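-- pv_equiv track=rewrite | github.com/ofiscal/tax.co | python/enph_revision/all_missing_coicops.py | make_readable_no_recurse
-- ===== SOURCE A (Python) =====
-- def first_word( string ): return string.split(",")[0]
--
-- def make_readable_no_recurse(ls):
--   i = 2 # The first and second lines are always okay.
--   while i < len(ls):
--     prev_coicop = first_word( ls[i-1] )
--     this_coicop = first_word( ls[i  ] )
--     if prev_coicop == this_coicop: i = i+1
--     else:
--       ls.insert(i,",,,")
--       i = i+2
--   return ls
-- ===== SOURCE B (Python) =====
-- def first_word( string ): return string.split(",")[0]
--
-- # One pass building the output list, then written back into ls (same object, same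
-- # in-place mutation as A); no index arithmetic or shifting inserts.
-- def make_readable_no_recurse(ls):
--   if len(ls) >= 2:
--     out = ls[:2]
--     for prev, cur in zip(ls[1:], ls[2:]):
--       if first_word(prev) != first_word(cur):
--         out.append(",,,")
--       out.append(cur)
--     ls[:] = out
--   return ls
-- ===== Notes on version B (the rewrite author's own statement) =====
-- stated objective: alternative
-- what changed: B replaces A's index-driven while loop that inserts separators into the list it is scanning (each insert shifting the tail, worst-case quadratic) by a single pass over adjacent pairs zip(ls[1:], ls[2:]) that builds the output list afresh and writes it back with ls[:] = out.
import Mathlib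
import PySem

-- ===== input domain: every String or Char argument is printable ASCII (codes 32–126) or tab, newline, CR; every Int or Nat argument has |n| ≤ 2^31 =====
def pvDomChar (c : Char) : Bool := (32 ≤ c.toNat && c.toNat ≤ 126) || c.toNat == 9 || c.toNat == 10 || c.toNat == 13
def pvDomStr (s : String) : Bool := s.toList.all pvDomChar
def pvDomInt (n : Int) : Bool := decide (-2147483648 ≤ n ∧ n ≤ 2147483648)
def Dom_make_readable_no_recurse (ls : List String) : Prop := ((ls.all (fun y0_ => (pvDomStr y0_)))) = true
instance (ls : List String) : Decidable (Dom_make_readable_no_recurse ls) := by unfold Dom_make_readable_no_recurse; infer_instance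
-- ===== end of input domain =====

-- B builds the output in one pass over adjacent pairs instead of A's index-driven
-- while loop that inserts into the list being scanned; equivalence is about the
-- return value only (both Pythons mutate ls in place to the same final contents).

-- ===== PORT A =====
-- first_word(string) = string.split(",")[0]; split(",") is never empty, so [0] is its head.
def pv_first_word (s : String) : String := ((PySem.Str.split? s ",").getD []).headD ""

-- the while loop of A; i starts at 2 and stays ≥ 2, so ls[i-1], ls[i] are plain
-- in-range accesses (getD is exact there).
def pvGoA (ls : List String) (i : Nat) : List String :=
  if _h : i < ls.length then
    if pv_first_word (ls.getD (i-1) "") = pv_first_word (ls.getD i "") then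
      pvGoA ls (i+1)
    else
      pvGoA (PySem.List.insert ls (i : Int) ",,,") (i+2)
  else ls
termination_by ls.length - i
decreasing_by
  · omega
  · simp [PySem.List.length_insert]; omega

def make_readable_no_recurse (ls : List String) : List String := pvGoA ls 2

-- ===== PORT B =====
def make_readable_no_recurse_alt (ls : List String) : List String :=
  if ls.length < 2 then ls
  else
    let out := PySem.List.slice ls none (some 2)          -- ls[:2]
    ((PySem.List.slice ls (some 1) none).zip (PySem.List.slice ls (some 2) none)).foldl
      (fun out pc =>
        (if pv_first_word pc.1 ≠ pv_first_word pc.2 then out ++ [",,,"] else out) ++ [pc.2])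
      out

-- ===== PRECONDITION & SPEC =====
def Spec_make_readable_no_recurse (ls : List String) (out : List String) : Prop := out = make_readable_no_recurse_alt ls
instance (ls : List String) (out : List String) : Decidable (Spec_make_readable_no_recurse ls out) := by unfold Spec_make_readable_no_recurse; infer_instance

-- ===== CLAIM (what is proved, stated in full; the proofs are below) =====
def Claim_equal_make_readable_no_recurse : Prop := ∀ (ls : List String), Dom_make_readable_no_recurse ls → Spec_make_readable_no_recurse ls (make_readable_no_recurse ls)

-- ===== LEMMAS AND PROOFS =====

-- common characterisation: the tail after the first kept element, with a separator
-- wherever the first word changes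
def pvOut (prev : String) : List String → List String
  | [] => []
  | x :: xs => (if pv_first_word prev = pv_first_word x then [x] else [",,,", x]) ++ pvOut x xs

theorem pvGoA_eq (n : Nat) : ∀ (pre : List String) (x : String) (rest : List String),
    rest.length ≤ n → pvGoA (pre ++ x :: rest) (pre.length + 1) = pre ++ x :: pvOut x rest := by
  induction n with
  | zero =>
    intro pre x rest hn
    have hrest : rest = [] := List.length_eq_zero_iff.mp (Nat.le_zero.mp hn)
    subst hrest
    rw [pvGoA]
    simp [pvOut]
  | succ n ih =>
    intro pre x rest hn
    match rest with
    | [] =>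
      rw [pvGoA]; simp [pvOut]
    | y :: rest' =>
      rw [pvGoA]
      have hlen : pre.length + 1 < (pre ++ x :: y :: rest').length := by simp
      have hget1 : (pre ++ x :: y :: rest').getD (pre.length + 1 - 1) "" = x := by
        simp [List.getD]
      have hget2 : (pre ++ x :: y :: rest').getD (pre.length + 1) "" = y := by
        simp [List.getD]
      rw [dif_pos hlen, hget1, hget2]
      by_cases hw : pv_first_word x = pv_first_word y
      · rw [if_pos hw]
        have h1 : pre ++ x :: y :: rest' = (pre ++ [x]) ++ y :: rest' := by simp
        have h2 : pre.length + 1 + 1 = (pre ++ [x]).length + 1 := by simp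
        rw [h1, h2, ih (pre ++ [x]) y rest' (by simpa using hn)]
        simp [pvOut, hw]
      · rw [if_neg hw]
        have hle : (pre.length + 1 : Nat) ≤ (pre ++ x :: y :: rest').length := by simp
        rw [PySem.List.insert_natCast _ _ _ hle]
        have htake : (pre ++ x :: y :: rest').take (pre.length + 1) = pre ++ [x] := by
          have : pre ++ x :: y :: rest' = (pre ++ [x]) ++ y :: rest' := by simp
          rw [this]
          have : pre.length + 1 = (pre ++ [x]).length := by simp
          rw [this, List.take_left]
        have hdrop : (pre ++ x :: y :: rest').drop (pre.length + 1) = y :: rest' := by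
          have : pre ++ x :: y :: rest' = (pre ++ [x]) ++ y :: rest' := by simp
          rw [this]
          have : pre.length + 1 = (pre ++ [x]).length := by simp
          rw [this, List.drop_left]
        rw [htake, hdrop]
        have h1 : (pre ++ [x]) ++ ",,," :: y :: rest' = (pre ++ [x, ",,,"]) ++ y :: rest' := by simp
        have h2 : pre.length + 1 + 2 = (pre ++ [x, ",,,"]).length + 1 := by simp
        rw [h1, h2, ih (pre ++ [x, ",,,"]) y rest' (by simpa using hn)]
        simp [pvOut, hw]

theorem pvFoldB_eq (ys : List String) : ∀ (y : String) (acc : List String),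
    ((y :: ys).zip ys).foldl
      (fun out pc =>
        (if pv_first_word pc.1 ≠ pv_first_word pc.2 then out ++ [",,,"] else out) ++ [pc.2])
      acc = acc ++ pvOut y ys := by
  induction ys with
  | nil => intro y acc; simp [pvOut]
  | cons z zs ih =>
    intro y acc
    simp only [List.zip_cons_cons, List.foldl_cons, ih z]
    by_cases hw : pv_first_word y = pv_first_word z <;> simp [pvOut, hw]

-- ===== VERDICT (by name: the statement is the Claim_ definition above) =====
theorem make_readable_no_recurse_spec : Claim_equal_make_readable_no_recurse := by
  intro ls _
  unfold Spec_make_readable_no_recurse make_readable_no_recurse make_readable_no_recurse_alt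
  match ls with
  | [] => rw [pvGoA]; simp
  | [a] => rw [pvGoA]; simp
  | a :: b :: t =>
    have hA : pvGoA (a :: b :: t) 2 = [a] ++ b :: pvOut b t := by
      have := pvGoA_eq t.length [a] b t le_rfl
      simpa using this
    rw [hA]
    have hlen : ¬ (a :: b :: t).length < 2 := by simp
    rw [if_neg hlen]
    rw [PySem.List.slice_to _ (by norm_num : (0:Int) ≤ 2),
        PySem.List.slice_from _ (by norm_num : (0:Int) ≤ 1),
        PySem.List.slice_from _ (by norm_num : (0:Int) ≤ 2)]
    have h2 : ((2:Int).toNat) = 2 := rfl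
    have h1 : ((1:Int).toNat) = 1 := rfl
    rw [h1, h2]
    have hd1 : (a :: b :: t).drop 1 = b :: t := rfl
    have hd2 : (a :: b :: t).drop 2 = t := rfl
    have ht2 : (a :: b :: t).take 2 = [a, b] := rfl
    rw [hd1, hd2, ht2, pvFoldB_eq t b [a, b]]
    simp
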